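-- pv_equiv track=rewrite | github.com/krenak/BSI | 2023-1/prog2/exercicios/tenicas/05_esquerda.py | esquerda
-- ===== SOURCE A (Python) =====
-- def incrementaGiros(g):
-- 	g = g+1
-- 	if g == 4:
-- 		g = 0
-- 	return g
--
-- def decrementaGiros(g):
-- 	g = g-1
-- 	if g == -4:
-- 		g = 0
-- 	return g
--
-- def esquerda(l):
-- 	'''Este ano o sargento está tendo mais trabalho do que de costume para treinar os recrutas. Um
-- 	deles é muito atrapalhado, e de vez em quando faz tudo errado – por exemplo, ao invés de virar
-- 	à direita quando comandado, vira à esquerda, causando grande confusão no batalhão.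
-- 	O sargento tem fama de durão e não vai deixar o recruta em paz enquanto este não aprender
-- 	a executar corretamente os comandos. No sábado à tarde, enquanto todos os outros recrutas
-- 	estão de folga, ele obrigou o recruta a fazer um treinamento extra. Com o recruta marchando
-- 	parado no mesmo lugar, o sargento emitiu uma série de comandos “esquerda volver!” e “direita
-- 	volver!”. A cada comando, o recruta deve girar sobre o mesmo ponto e dar um quarto de volta
-- 	na direção correspondente ao comando. Por exemplo, se o recruta está inicialmente com o rosto
-- 	voltado para a direção norte, após um comando de “esquerda volver!” ele deve ficar com o rosto
-- 	voltado para a direção oeste. Se o recruta está inicialmente com o rosto voltado para o leste,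
-- 	após um comando “direita, volver!” ele deve ter o rosto voltado para o sul.
-- 	No entanto, durante o treinamento, em que o recruta tinha inicialmente o rosto voltado
-- 	para o norte, o sargento emitiu uma série tão extensa de comandos, e tão rapidamente, que até
-- 	ele ficou confuso, e não sabe mais para qual direção o recruta deve ter seu rosto voltado após
-- 	executar todos os comandos. Você pode ajudar o sargento?
--
-- 	Entrada: Uma lista contendo N caracteres, descrevendo a série de comandos emitidos pelo sargento.
-- 			 Cada comando é representado por uma letra: ‘E’ (para “esquerda, volver!”) e
-- 			 ‘D’ (para “direita, volver!”).
-- 	Saida: Impressão na tela da direção para a qual o recruta deve ter sua face voltada após executar a série de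
-- 	comandos, considerando que no inı́cio o recruta tem a face voltada para o norte. A linha deve
-- 	conter uma letra entre ‘N’, ‘L’, ‘S’ e ‘O’, representando respectivamente as direções norte, leste,
-- 	sul e oeste.'''
--
-- 	direcoes = ['N', 'L', 'S', 'O']
-- 	giros = 0
--
-- 	for comando in l:
-- 		if comando == 'D':
-- 			giros = incrementaGiros(giros)
-- 		else:
-- 			giros = decrementaGiros(giros)
--
-- 	return direcoes[giros]
-- ===== SOURCE B (Python) =====
-- def esquerda(l):
--     direcoes = ['N', 'L', 'S', 'O']
--     d = l.count('D')
--     return direcoes[(2 * d - len(l)) % 4]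
-- ===== Notes on version B (the rewrite author's own statement) =====
-- stated objective: simpler
-- what changed: Replaces A's per-command accumulator loop with wrap helpers by a single count of 'D' commands and a closed-form modular index: direcoes[(2*d - len(l)) % 4].
import Mathlib
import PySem

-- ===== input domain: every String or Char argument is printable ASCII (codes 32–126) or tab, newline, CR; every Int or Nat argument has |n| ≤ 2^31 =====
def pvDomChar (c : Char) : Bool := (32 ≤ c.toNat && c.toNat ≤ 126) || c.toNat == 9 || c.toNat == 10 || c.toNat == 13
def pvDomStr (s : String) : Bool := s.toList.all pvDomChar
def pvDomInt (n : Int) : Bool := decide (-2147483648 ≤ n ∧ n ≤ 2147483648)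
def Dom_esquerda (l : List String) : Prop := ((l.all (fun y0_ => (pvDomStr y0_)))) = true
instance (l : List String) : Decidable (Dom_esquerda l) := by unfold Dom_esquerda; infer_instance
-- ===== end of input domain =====

-- B replaces A's per-command accumulator with wrap helpers by counting 'D's and one closed-form modular index (objective: simpler).

-- ===== PORT A =====
def incrementaGiros (g : Int) : Int :=
  let g := g + 1
  if g = 4 then 0 else g

def decrementaGiros (g : Int) : Int :=
  let g := g - 1
  if g = -4 then 0 else g

-- direcoes[giros]: giros always stays in [-3,3] so the index is valid; .getD "" renders the never-raising lookup total
def esquerda (l : List String) : String :=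
  let direcoes : List String := ["N", "L", "S", "O"]
  let giros : Int := l.foldl (fun giros comando =>
    if comando == "D" then incrementaGiros giros else decrementaGiros giros) 0
  (PySem.List.pyGet? direcoes giros).getD ""

-- ===== PORT B =====
def esquerda_alt (l : List String) : String :=
  let direcoes : List String := ["N", "L", "S", "O"]
  let d : Int := (PySem.List.count l "D" : Int)
  (PySem.List.pyGet? direcoes (PySem.Int.mod (2 * d - l.length) 4)).getD ""

-- ===== PRECONDITION & SPEC =====
def Spec_esquerda (l : List String) (out : String) : Prop := out = esquerda_alt l
instance (l : List String) (out : String) : Decidable (Spec_esquerda l out) := by unfold Spec_esquerda; infer_instance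

-- ===== CLAIM (what is proved, stated in full; the proofs are below) =====
def Claim_equal_esquerda : Prop := ∀ (l : List String), Dom_esquerda l → Spec_esquerda l (esquerda l)

-- ===== LEMMAS AND PROOFS =====

-- loop invariant: the accumulator stays in [-3,3] and agrees mod 4 with g + 2*count('D') - len
theorem esquerda_loop_inv (l : List String) (g : Int) (h1 : -3 ≤ g) (h2 : g ≤ 3) :
    -3 ≤ l.foldl (fun giros comando =>
        if comando == "D" then incrementaGiros giros else decrementaGiros giros) g ∧
    l.foldl (fun giros comando =>
        if comando == "D" then incrementaGiros giros else decrementaGiros giros) g ≤ 3 ∧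
    (l.foldl (fun giros comando =>
        if comando == "D" then incrementaGiros giros else decrementaGiros giros) g) % 4
      = (g + 2 * (l.count "D" : Int) - l.length) % 4 := by
  induction l generalizing g with
  | nil => refine ⟨h1, h2, ?_⟩; simp
  | cons c l ih =>
    simp only [List.foldl_cons]
    by_cases hc : c == "D"
    · simp only [hc, if_true, List.count_cons, List.length_cons]
      have hb : -3 ≤ incrementaGiros g ∧ incrementaGiros g ≤ 3 ∧
          (incrementaGiros g) % 4 = (g + 1) % 4 := by
        simp only [incrementaGiros]; split <;> exact ⟨by omega, by omega, by omega⟩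
      obtain ⟨hb1, hb2, hb3⟩ := hb
      obtain ⟨i1, i2, i3⟩ := ih _ hb1 hb2
      refine ⟨i1, i2, ?_⟩
      rw [i3]; push_cast; omega
    · simp only [hc, Bool.false_eq_true, if_false, List.count_cons, List.length_cons]
      have hb : -3 ≤ decrementaGiros g ∧ decrementaGiros g ≤ 3 ∧
          (decrementaGiros g) % 4 = (g - 1) % 4 := by
        simp only [decrementaGiros]; split <;> exact ⟨by omega, by omega, by omega⟩
      obtain ⟨hb1, hb2, hb3⟩ := hb
      obtain ⟨i1, i2, i3⟩ := ih _ hb1 hb2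
      refine ⟨i1, i2, ?_⟩
      rw [i3]; push_cast; omega

theorem pyGet_wrap (r : Int) (h1 : -3 ≤ r) (h2 : r ≤ 3) :
    (PySem.List.pyGet? ["N", "L", "S", "O"] r).getD "" =
    (PySem.List.pyGet? (["N", "L", "S", "O"] : List String) (r % 4)).getD "" := by
  interval_cases r <;> decide

-- ===== VERDICT (by name: the statement is the Claim_ definition above) =====
theorem esquerda_spec : Claim_equal_esquerda := by
  intro l _
  show esquerda l = esquerda_alt l
  unfold esquerda esquerda_alt
  obtain ⟨h1, h2, h3⟩ := esquerda_loop_inv l 0 (by omega) (by omega)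
  rw [pyGet_wrap _ h1 h2, h3]
  simp only [PySem.List.count_eq, PySem.Int.mod_eq_emod_of_pos (show (0:Int) < 4 by norm_num)]
  norm_num
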